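-- pv_equiv track=rewrite | github.com/pypi-data/pypi-mirror-87 | packages/Swift-CCF-Kravchuk/Swift_CCF_Kravchuk-0.0.1-py3-none-any.whl/util/util.py | remove_star_in_line
-- ===== SOURCE A (Python) =====
-- def remove_star_in_line(line):
--     """Return (docstring) line without javadoc style *"""
--     for i in range(0, len(line)):
--         if line[i] == " ":
--             continue
--
--         elif line[i:i+2] == "*/":
--             return None
--
--         elif line[i:i+2] == "* ":
--             return line[i+2:]
--
--         elif line[i] == "*":
--             return line[i+1:]
--
--         else:
--             return line
--
--     return ""
-- ===== SOURCE B (Python) =====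
-- _KEEP = object()  # sentinel: "this line is not a javadoc continuation, keep it verbatim"
--
-- def _classify(line):
--     """Recursively classify the line: '' -> '', '*'-led -> payload, '*/' -> None,
--     anything else -> _KEEP (caller substitutes the untouched original line)."""
--     if not line:
--         return ""
--     c = line[0]
--     if c == " ":
--         return _classify(line[1:])
--     if c == "*":
--         rest = line[1:]
--         if rest[:1] == "/":
--             return None
--         if rest[:1] == " ":
--             return rest[1:]
--         return rest
--     return _KEEP
--
-- def remove_star_in_line(line):
--     """Return (docstring) line without javadoc style *"""
--     r = _classify(line)
--     return line if r is _KEEP else r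
-- ===== Notes on version B (the rewrite author's own statement) =====
-- stated objective: alternative
-- what changed: Replaces A's single interleaved index loop (skip spaces and prefix-test in one pass, returning directly) by a recursive head classifier with a KEEP sentinel: it recurses past spaces, dispatches on the star character and then on the single character after it, and a separate top-level wrapper maps the sentinel back to the original line.
import Mathlib
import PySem

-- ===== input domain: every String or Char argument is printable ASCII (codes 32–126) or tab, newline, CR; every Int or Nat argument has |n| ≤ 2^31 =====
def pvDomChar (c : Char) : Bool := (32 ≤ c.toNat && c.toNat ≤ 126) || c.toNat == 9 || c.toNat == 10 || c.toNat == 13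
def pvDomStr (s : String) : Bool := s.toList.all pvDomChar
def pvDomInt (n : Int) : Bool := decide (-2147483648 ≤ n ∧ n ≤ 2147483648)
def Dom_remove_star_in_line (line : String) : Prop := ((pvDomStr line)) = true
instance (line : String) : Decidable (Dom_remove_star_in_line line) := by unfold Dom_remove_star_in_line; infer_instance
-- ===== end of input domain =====

-- B replaces A's interleaved index loop by a recursive head-classifier with a KEEP sentinel (objective: alternative).


-- ===== PORT A =====
-- loop over the characters from the first index on; `rest` is line[i:], so
-- line[i:i+2] = rest.take 2, line[i+1:] = rest.tail, line[i+2:] = rest.tail.tail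
def pvGoA (line : String) : List Char → Option String
  | [] => some ""                                   -- loop ran off the end: return ""
  | c :: rs =>
    if c = ' ' then pvGoA line rs                   -- continue
    else if (c :: rs).take 2 = ['*', '/'] then none -- return None
    else if (c :: rs).take 2 = ['*', ' '] then some (String.ofList (rs.drop 1)) -- return line[i+2:]
    else if c = '*' then some (String.ofList rs)    -- return line[i+1:]
    else some line                                  -- return line

def remove_star_in_line (line : String) : Option String :=
  pvGoA line line.toList

-- ===== PORT B =====
-- B's _classify: result `none` = the _KEEP sentinel, `some r` = a definite result r.
def pvClassify : List Char → Option (Option String)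
  | [] => some (some "")
  | c :: rs =>
    if c = ' ' then pvClassify rs
    else if c = '*' then
      match rs with
      | '/' :: _ => some none                       -- rest[:1] == "/"
      | ' ' :: t => some (some (String.ofList t))   -- rest[:1] == " "
      | _ => some (some (String.ofList rs))
    else none                                       -- _KEEP

def remove_star_in_line_alt (line : String) : Option String :=
  (pvClassify line.toList).getD (some line)

-- ===== PRECONDITION & SPEC =====
def Spec_remove_star_in_line (line : String) (out : Option String) : Prop := out = remove_star_in_line_alt line
instance (line : String) (out : Option String) : Decidable (Spec_remove_star_in_line line out) := by unfold Spec_remove_star_in_line; infer_instance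

-- ===== CLAIM (what is proved, stated in full; the proofs are below) =====
def Claim_equal_remove_star_in_line : Prop := ∀ (line : String), Dom_remove_star_in_line line → Spec_remove_star_in_line line (remove_star_in_line line)

-- ===== LEMMAS AND PROOFS =====
lemma pvGoA_eq_classify (line : String) (rest : List Char) :
    pvGoA line rest = (pvClassify rest).getD (some line) := by
  induction rest with
  | nil => simp [pvGoA, pvClassify]
  | cons c rs ih =>
    by_cases hc : c = ' '
    · subst hc; simpa [pvGoA, pvClassify] using ih
    · by_cases hs : c = '*'
      · subst hs
        cases rs with
        | nil => simp [pvGoA, pvClassify]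
        | cons d t =>
          by_cases h1 : d = '/'
          · subst h1; simp [pvGoA, pvClassify]
          · by_cases h2 : d = ' '
            · subst h2; simp [pvGoA, pvClassify]
            · simp [pvGoA, pvClassify, h1, h2]
      · simp [pvGoA, pvClassify, hc, hs]

-- ===== VERDICT (by name: the statement is the Claim_ definition above) =====
theorem remove_star_in_line_spec : Claim_equal_remove_star_in_line := by
  intro line _
  unfold Spec_remove_star_in_line remove_star_in_line remove_star_in_line_alt
  exact pvGoA_eq_classify line line.toList
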